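-- pv_equiv track=rewrite | github.com/Cstewart-HC/pea-met-network | scripts/sync_state.py | derive_phase_from_commits
-- ===== SOURCE A (Python) =====
-- def derive_phase_from_commits(commits: list[str]) -> tuple[int, str]:
--     """Derive the current phase from commit message prefixes."""
--     phase_keywords = {
--         1: {"audit", "data", "scaffold", "chore"},
--         2: {"scrub", "clean", "normali", "resamp", "imput"},
--         3: {"explore", "visual", "inspect"},
--         4: {"model", "stanhope", "fwi", "moisture", "ref"},
--         5: {"redund", "pca", "cluster", "benchmark"},
--         6: {"interp", "uncertain", "recommend", "report"},
--     }
--     phase_names = {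
--         1: "Obtain",
--         2: "Scrub",
--         3: "Explore",
--         4: "Model: Reference + FWI",
--         5: "Model: Redundancy",
--         6: "Interpret",
--     }
--
--     latest_phase = 1
--     for line in commits:
--         scope = line.split(":", 1)[-1].lower() if ":" in line else line.lower()
--         for phase, keywords in phase_keywords.items():
--             if any(kw in scope for kw in keywords):
--                 latest_phase = max(latest_phase, phase)
--
--     return latest_phase, phase_names[latest_phase]
-- ===== SOURCE B (Python) =====
-- def derive_phase_from_commits(commits: list[str]) -> tuple[int, str]:
--     """Derive the current phase from commit message prefixes.
--
--     Highest-phase-first search: scopes are computed once, then phases are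
--     tried from 6 down to 2, returning the first phase some scope matches.
--     """
--     table = [
--         (6, "Interpret", ("interp", "uncertain", "recommend", "report")),
--         (5, "Model: Redundancy", ("redund", "pca", "cluster", "benchmark")),
--         (4, "Model: Reference + FWI", ("model", "stanhope", "fwi", "moisture", "ref")),
--         (3, "Explore", ("explore", "visual", "inspect")),
--         (2, "Scrub", ("scrub", "clean", "normali", "resamp", "imput")),
--     ]
--     scopes = [(line.split(":", 1)[-1] if ":" in line else line).lower() for line in commits]
--     for phase, name, keywords in table:
--         if any(kw in scope for scope in scopes for kw in keywords):
--             return phase, name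
--     return 1, "Obtain"
-- ===== Notes on version B (the rewrite author's own statement) =====
-- stated objective: faster
-- what changed: Replaces the per-commit running-max accumulator that tests all six keyword sets on every line with a descending highest-phase-first early-return search over once-precomputed scopes.
import Mathlib
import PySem

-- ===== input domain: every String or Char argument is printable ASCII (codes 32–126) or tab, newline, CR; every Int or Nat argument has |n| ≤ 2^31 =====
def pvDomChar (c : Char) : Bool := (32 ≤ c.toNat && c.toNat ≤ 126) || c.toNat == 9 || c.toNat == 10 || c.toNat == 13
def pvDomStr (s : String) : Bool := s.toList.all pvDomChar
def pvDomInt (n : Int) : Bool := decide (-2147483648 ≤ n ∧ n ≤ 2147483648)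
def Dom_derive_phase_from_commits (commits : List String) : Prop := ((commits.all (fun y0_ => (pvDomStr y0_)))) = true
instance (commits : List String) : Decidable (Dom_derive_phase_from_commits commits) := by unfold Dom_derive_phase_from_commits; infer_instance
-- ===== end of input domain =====

-- B replaces A's per-commit running-max over all six keyword sets by a descending
-- highest-phase-first early-return search over once-precomputed scopes (measured constant-factor speedup).

-- ===== PORT A =====
-- scope = line.split(":", 1)[-1].lower() if ":" in line else line.lower()
-- ([-1] via pyGet?; the list returned by split(":", 1) is never empty, so getD "" is unreachable)
def pvScope (line : String) : String :=
  if PySem.Str.isIn ":" line then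
    PySem.Str.lower ((PySem.List.pyGet? ((PySem.Str.splitMax? line ":" 1).getD []) (-1)).getD "")
  else PySem.Str.lower line

def pvKeywordsA : List (Int × List String) :=
  [(1, ["audit", "data", "scaffold", "chore"]),
   (2, ["scrub", "clean", "normali", "resamp", "imput"]),
   (3, ["explore", "visual", "inspect"]),
   (4, ["model", "stanhope", "fwi", "moisture", "ref"]),
   (5, ["redund", "pca", "cluster", "benchmark"]),
   (6, ["interp", "uncertain", "recommend", "report"])]

def pvPhaseNamesA : PySem.Dict Int String :=
  PySem.Dict.mk [(1, "Obtain"), (2, "Scrub"), (3, "Explore"),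
                 (4, "Model: Reference + FWI"), (5, "Model: Redundancy"), (6, "Interpret")]

-- body of A's outer loop: the inner loop over phase_keywords.items()
-- scope = pvScope line (the Python's local variable, inlined)
def pvInnerA (latest : Int) (line : String) : Int :=
  pvKeywordsA.foldl
    (fun latest pk =>
      if pk.2.any (fun kw => PySem.Str.isIn kw (pvScope line)) then max latest pk.1 else latest)
    latest

def derive_phase_from_commits (commits : List String) : Int × String :=
  let latest := commits.foldl pvInnerA 1
  (latest, ((pvPhaseNamesA.get? latest).getD ""))  -- latest ∈ 1..6, so getD "" is unreachable

-- ===== PORT B =====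
def pvTableB : List (Int × String × List String) :=
  [(6, "Interpret", ["interp", "uncertain", "recommend", "report"]),
   (5, "Model: Redundancy", ["redund", "pca", "cluster", "benchmark"]),
   (4, "Model: Reference + FWI", ["model", "stanhope", "fwi", "moisture", "ref"]),
   (3, "Explore", ["explore", "visual", "inspect"]),
   (2, "Scrub", ["scrub", "clean", "normali", "resamp", "imput"])]

-- the for-loop over the table with its early return
def pvSearchB (scopes : List String) : List (Int × String × List String) → Int × String
  | [] => (1, "Obtain")
  | (phase, name, keywords) :: rest =>
      if scopes.any (fun scope => keywords.any (fun kw => PySem.Str.isIn kw scope)) then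
        (phase, name)
      else pvSearchB scopes rest

def derive_phase_from_commits_alt (commits : List String) : Int × String :=
  pvSearchB (commits.map pvScope) pvTableB

-- ===== PRECONDITION & SPEC =====
def Spec_derive_phase_from_commits (commits : List String) (out : Int × String) : Prop := out = derive_phase_from_commits_alt commits
instance (commits : List String) (out : Int × String) : Decidable (Spec_derive_phase_from_commits commits out) := by unfold Spec_derive_phase_from_commits; infer_instance

-- ===== CLAIM (what is proved, stated in full; the proofs are below) =====
def Claim_equal_derive_phase_from_commits : Prop := ∀ (commits : List String), Dom_derive_phase_from_commits commits → Spec_derive_phase_from_commits commits (derive_phase_from_commits commits)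

-- ===== LEMMAS AND PROOFS =====

-- does line's scope contain one of the keywords?
def pvMatch (kws : List String) (l : String) : Bool :=
  kws.any (fun kw => PySem.Str.isIn kw (pvScope l))

-- does some commit's scope contain one of the keywords?
def pvAnyMatch (kws : List String) (commits : List String) : Bool :=
  commits.any (fun l => pvMatch kws l)

def pvPhaseOf (b6 b5 b4 b3 b2 : Bool) : Int :=
  if b6 then 6 else if b5 then 5 else if b4 then 4 else if b3 then 3 else if b2 then 2 else 1

def pvK2 : List String := ["scrub", "clean", "normali", "resamp", "imput"]
def pvK3 : List String := ["explore", "visual", "inspect"]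
def pvK4 : List String := ["model", "stanhope", "fwi", "moisture", "ref"]
def pvK5 : List String := ["redund", "pca", "cluster", "benchmark"]
def pvK6 : List String := ["interp", "uncertain", "recommend", "report"]

def pvN (commits : List String) : Int :=
  pvPhaseOf (pvAnyMatch pvK6 commits) (pvAnyMatch pvK5 commits) (pvAnyMatch pvK4 commits)
            (pvAnyMatch pvK3 commits) (pvAnyMatch pvK2 commits)

theorem pvPhaseOf_ge_one : ∀ b6 b5 b4 b3 b2 : Bool, 1 ≤ pvPhaseOf b6 b5 b4 b3 b2 := by decide

theorem pvMerge : ∀ x6 x5 x4 x3 x2 y6 y5 y4 y3 y2 : Bool,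
    pvPhaseOf (x6 || y6) (x5 || y5) (x4 || y4) (x3 || y3) (x2 || y2)
      = max (pvPhaseOf x6 x5 x4 x3 x2) (pvPhaseOf y6 y5 y4 y3 y2) := by decide

theorem pvInnerA_eq (l : String) (acc : Int) (h : 1 ≤ acc) :
    pvInnerA acc l
      = max acc (pvPhaseOf (pvMatch pvK6 l) (pvMatch pvK5 l) (pvMatch pvK4 l)
                           (pvMatch pvK3 l) (pvMatch pvK2 l)) := by
  simp only [pvInnerA, pvKeywordsA, List.foldl_cons, List.foldl_nil,
             pvMatch, pvK2, pvK3, pvK4, pvK5, pvK6, pvPhaseOf]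
  simp only [← Bool.cond_eq_ite]
  rcases Bool.eq_false_or_eq_true (["audit", "data", "scaffold", "chore"].any fun kw => PySem.Str.isIn kw (pvScope l)) with h1 | h1 <;>
    simp only [h1, Bool.cond_false, Bool.cond_true] <;>
  rcases Bool.eq_false_or_eq_true (["scrub", "clean", "normali", "resamp", "imput"].any fun kw => PySem.Str.isIn kw (pvScope l)) with h2 | h2 <;>
    simp only [h2, Bool.cond_false, Bool.cond_true] <;>
  rcases Bool.eq_false_or_eq_true (["explore", "visual", "inspect"].any fun kw => PySem.Str.isIn kw (pvScope l)) with h3 | h3 <;>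
    simp only [h3, Bool.cond_false, Bool.cond_true] <;>
  rcases Bool.eq_false_or_eq_true (["model", "stanhope", "fwi", "moisture", "ref"].any fun kw => PySem.Str.isIn kw (pvScope l)) with h4 | h4 <;>
    simp only [h4, Bool.cond_false, Bool.cond_true] <;>
  rcases Bool.eq_false_or_eq_true (["redund", "pca", "cluster", "benchmark"].any fun kw => PySem.Str.isIn kw (pvScope l)) with h5 | h5 <;>
    simp only [h5, Bool.cond_false, Bool.cond_true] <;>
  rcases Bool.eq_false_or_eq_true (["interp", "uncertain", "recommend", "report"].any fun kw => PySem.Str.isIn kw (pvScope l)) with h6 | h6 <;>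
    simp only [h6, Bool.cond_false, Bool.cond_true] <;>
    clear h1 h2 h3 h4 h5 h6 <;> refine le_antisymm ?_ ?_ <;>
    simp only [max_le_iff, le_max_iff, Bool.false_eq_true, if_true, if_false] <;> omega

theorem pvFoldA (commits : List String) : ∀ acc : Int, 1 ≤ acc →
    commits.foldl pvInnerA acc = max acc (pvN commits) := by
  induction commits with
  | nil =>
      intro acc h
      simp only [List.foldl_nil, pvN, pvAnyMatch, List.any_nil, pvPhaseOf,
        Bool.false_eq_true, if_false]
      exact (max_eq_left h).symm
  | cons l ls ih =>
      intro acc h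
      have h1 : 1 ≤ pvInnerA acc l := by
        rw [pvInnerA_eq l acc h]
        exact le_trans h (le_max_left _ _)
      rw [List.foldl_cons, ih _ h1, pvInnerA_eq l acc h]
      have hN : pvN (l :: ls)
          = max (pvPhaseOf (pvMatch pvK6 l) (pvMatch pvK5 l) (pvMatch pvK4 l)
                           (pvMatch pvK3 l) (pvMatch pvK2 l)) (pvN ls) := by
        simp only [pvN, pvAnyMatch, List.any_cons]
        exact pvMerge _ _ _ _ _ _ _ _ _ _
      rw [hN, max_assoc]

theorem pvA_eq (commits : List String) :
    derive_phase_from_commits commits = (pvN commits, ((pvPhaseNamesA.get? (pvN commits)).getD "")) := by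
  have := pvPhaseOf_ge_one (pvAnyMatch pvK6 commits) (pvAnyMatch pvK5 commits)
    (pvAnyMatch pvK4 commits) (pvAnyMatch pvK3 commits) (pvAnyMatch pvK2 commits)
  simp only [derive_phase_from_commits, pvFoldA commits 1 (le_refl 1)]
  have h1 : max (1 : Int) (pvN commits) = pvN commits := max_eq_right this
  rw [h1]

theorem pvB_eq (commits : List String) :
    derive_phase_from_commits_alt commits
      = (if pvAnyMatch pvK6 commits then ((6 : Int), "Interpret")
         else if pvAnyMatch pvK5 commits then (5, "Model: Redundancy")
         else if pvAnyMatch pvK4 commits then (4, "Model: Reference + FWI")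
         else if pvAnyMatch pvK3 commits then (3, "Explore")
         else if pvAnyMatch pvK2 commits then (2, "Scrub")
         else (1, "Obtain")) := by
  simp only [derive_phase_from_commits_alt, pvTableB, pvSearchB, List.any_map,
             pvAnyMatch, pvMatch, pvK2, pvK3, pvK4, pvK5, pvK6, Function.comp_def]
  try rfl

theorem pvBool_case : ∀ b6 b5 b4 b3 b2 : Bool,
    ((pvPhaseOf b6 b5 b4 b3 b2, ((pvPhaseNamesA.get? (pvPhaseOf b6 b5 b4 b3 b2)).getD ""))
      : Int × String)
      = (if b6 then ((6 : Int), "Interpret")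
         else if b5 then (5, "Model: Redundancy")
         else if b4 then (4, "Model: Reference + FWI")
         else if b3 then (3, "Explore")
         else if b2 then (2, "Scrub")
         else (1, "Obtain")) := by decide

-- ===== VERDICT (by name: the statement is the Claim_ definition above) =====
theorem derive_phase_from_commits_spec : Claim_equal_derive_phase_from_commits := by
  intro commits _
  unfold Spec_derive_phase_from_commits
  rw [pvA_eq, pvB_eq, pvN]
  exact pvBool_case _ _ _ _ _
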